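-- pv_equiv track=rewrite | github.com/LJH-LBJ/vllm-omni | vllm_omni/distributed/omni_connectors/adapter.py | compute_first_chunk_talker_len
-- ===== SOURCE A (Python) =====
-- def compute_talker_prompt_ids_length(prompt_ids: list[int]) -> int:
--     """Compute the length of the talker prompt ids.
--
--     Args:
--         prompt_ids: The prompt ids tensor.
--
--     Returns:
--         The length of the talker prompt ids.
--     """
--     im_start_token_id = 151644
--     system_token_id = 8948
--     user_token_id = 872
--     assistant_token_id = 77091
--     im_start_indexes = [i for i in range(len(prompt_ids)) if prompt_ids[i] == im_start_token_id]
--     im_start_indexes.append(len(prompt_ids))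
--     sum_user_len = 0
--     assistant_len = 0
--     for i in range(len(im_start_indexes) - 1):
--         s = im_start_indexes[i]
--         e = im_start_indexes[i + 1]
--         role = prompt_ids[s + 1]
--         if role == system_token_id:
--             continue
--         elif role == user_token_id:
--             sum_user_len += e - s
--         elif role == assistant_token_id and i == len(im_start_indexes) - 2:
--             assistant_len += 9  # 3 + 4 + 1 + 1
--         else:
--             pass
--
--     return sum_user_len + assistant_len
--
-- def compute_first_chunk_talker_len(
--     prompt_ids: list[int],
--     thinker_max_batched_tokens: int,
-- ) -> tuple[int, int]:
--     """Compute (first_chunk_talker_len, total_talker_placeholder_len).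
--
--     In async_chunk mode the thinker sends embeddings in batches of
--     ``thinker_max_batched_tokens``.  The first batch covers tokens
--     [0 .. min(max_batched, total)-1].  After filtering out the system
--     segment, the remaining non-system tokens correspond to the talker
--     placeholder tokens that will be available from the very first chunk.
--
--     Pre-warming the talker with only ``first_chunk_talker_len`` tokens
--     (instead of the full ``total_talker_placeholder_len``) ensures the
--     talker scheduler never schedules more tokens than there are valid
--     thinker embeddings available for that step, avoiding KV-cache
--     corruption from garbage placeholder embeddings.
--
--     Args:
--         prompt_ids: Thinker prompt token IDs.
--         thinker_max_batched_tokens: ``max_num_batched_tokens`` of the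
--             thinker's scheduler config.
--
--     Returns:
--         ``(first_chunk_talker_len, total_talker_placeholder_len)``
--     """
--     total_talker_len = compute_talker_prompt_ids_length(prompt_ids)
--
--     im_start_token_id = 151644
--     system_token_id = 8948
--
--     # Locate system segment(s) and sum their lengths.  The system turn is
--     # always first in Qwen3-Omni, so we stop counting once we hit a non-system
--     # segment.
--     im_start_indexes = [i for i in range(len(prompt_ids)) if prompt_ids[i] == im_start_token_id]
--     im_start_indexes.append(len(prompt_ids))
--     system_prefix_len = 0
--     for i in range(len(im_start_indexes) - 1):
--         s = im_start_indexes[i]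
--         e = im_start_indexes[i + 1]
--         if len(prompt_ids) > s + 1 and prompt_ids[s + 1] == system_token_id:
--             system_prefix_len += e - s
--         else:
--             break  # system is always first
--
--     total_prompt_len = len(prompt_ids)
--     if thinker_max_batched_tokens <= 0:
--         return max(1, total_talker_len), total_talker_len
--
--     # Find the first thinker batch that contains at least one non-system token.
--     # Each batch spans [batch_start .. batch_start + max_batched - 1].
--     # batch_index of the first non-system token = floor(system_prefix_len / max_batched)
--     first_non_sys_batch_start = (system_prefix_len // thinker_max_batched_tokens) * thinker_max_batched_tokens
--     first_non_sys_batch_end = min(first_non_sys_batch_start + thinker_max_batched_tokens, total_prompt_len)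
--     first_chunk_non_system = max(0, first_non_sys_batch_end - max(system_prefix_len, first_non_sys_batch_start))
--
--     # Non-system thinker tokens map 1:1 to talker placeholder tokens (up to
--     # the bootstrap boundary).  Clip to total_talker_len to be safe.
--     first_chunk_talker_len = min(first_chunk_non_system, total_talker_len)
--     first_chunk_talker_len = max(1, first_chunk_talker_len)
--
--     return first_chunk_talker_len, total_talker_len
-- ===== SOURCE B (Python) =====
-- def compute_first_chunk_talker_len(prompt_ids, thinker_max_batched_tokens):
--     IM, SYS, USER, ASST = 151644, 8948, 872, 77091
--     n = len(prompt_ids)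
--     sum_user = 0
--     sys_prefix = 0
--     counting_sys = True
--     bonus = 0
--     prev = None  # index of the im_start that opened the current segment
--     for i in range(n + 1):
--         if i == n or prompt_ids[i] == IM:
--             if prev is not None:
--                 role = prompt_ids[prev + 1]
--                 if role == USER:
--                     sum_user += i - prev
--                 if counting_sys:
--                     if role == SYS:
--                         sys_prefix += i - prev
--                     else:
--                         counting_sys = False
--                 if i == n and role == ASST:
--                     bonus = 9
--             if i < n:
--                 prev = i
--     total = sum_user + bonus
--     if thinker_max_batched_tokens <= 0:
--         return max(1, total), total
--     start = (sys_prefix // thinker_max_batched_tokens) * thinker_max_batched_tokens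
--     end = min(start + thinker_max_batched_tokens, n)
--     first = max(0, end - max(sys_prefix, start))
--     return max(1, min(first, total)), total
-- ===== Notes on version B (the rewrite author's own statement) =====
-- stated objective: faster
-- what changed: Replaced A's materialized im_start index table and its three separate scans (comprehension building the table, a consecutive-pair user/assistant loop, and a consecutive-pair system-prefix loop with break) by a single streaming state machine over the tokens that tracks the previous im_start, the user-length sum, the leading-system prefix via a flag, and the final-assistant bonus; the closed-form first-chunk arithmetic is kept.
-- outside the precondition, e.g. on compute_first_chunk_talker_len([151644, 8948, 1, 151644], 4): A raises IndexError, B raises IndexError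
import Mathlib
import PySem

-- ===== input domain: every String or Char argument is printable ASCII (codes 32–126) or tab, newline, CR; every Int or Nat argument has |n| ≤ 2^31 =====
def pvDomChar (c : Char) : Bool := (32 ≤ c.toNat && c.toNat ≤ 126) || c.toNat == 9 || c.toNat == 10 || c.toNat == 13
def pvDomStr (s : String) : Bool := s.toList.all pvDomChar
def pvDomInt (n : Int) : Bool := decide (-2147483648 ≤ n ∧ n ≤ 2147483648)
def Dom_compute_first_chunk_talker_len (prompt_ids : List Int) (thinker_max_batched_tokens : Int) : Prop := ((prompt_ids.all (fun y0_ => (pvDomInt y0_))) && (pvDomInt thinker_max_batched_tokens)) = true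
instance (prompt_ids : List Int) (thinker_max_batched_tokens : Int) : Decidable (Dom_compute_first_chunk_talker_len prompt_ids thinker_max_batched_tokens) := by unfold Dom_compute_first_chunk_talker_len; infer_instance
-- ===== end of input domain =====

-- B replaces A's materialized im_start index table and its three scans by one streaming state
-- machine over the tokens (objective: faster by a constant factor, measured).

-- ===== PORT A =====
-- A's helper compute_talker_prompt_ids_length
def pv_talker_prompt_ids_length (prompt_ids : List Int) : Int :=
  let im_start_indexes :=
    ((PySem.List.pyRange 0 ((prompt_ids.length : Int)) 1).filter
      (fun i => PySem.List.pyGetD prompt_ids i 0 == 151644)) ++ [(prompt_ids.length : Int)]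
  let st := (PySem.List.pyRange 0 (((im_start_indexes.length : Int)) - 1) 1).foldl
    (fun (st : Int × Int) i =>
      let s := PySem.List.pyGetD im_start_indexes i 0
      let e := PySem.List.pyGetD im_start_indexes (i + 1) 0
      let role := PySem.List.pyGetD prompt_ids (s + 1) 0
      if role == 8948 then st
      else if role == 872 then (st.1 + (e - s), st.2)
      else if role == 77091 && i == ((im_start_indexes.length : Int)) - 2 then (st.1, st.2 + 9)
      else st) (0, 0)
  st.1 + st.2

-- A's system-prefix loop; the early return is Python's 'break'
def pv_sysloop (prompt_ids im_start_indexes : List Int) : List Int → Int → Int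
  | [], acc => acc
  | i :: rest, acc =>
    let s := PySem.List.pyGetD im_start_indexes i 0
    let e := PySem.List.pyGetD im_start_indexes (i + 1) 0
    if ((prompt_ids.length : Int) > s + 1) && (PySem.List.pyGetD prompt_ids (s + 1) 0 == 8948)
    then pv_sysloop prompt_ids im_start_indexes rest (acc + (e - s))
    else acc

def compute_first_chunk_talker_len (prompt_ids : List Int) (thinker_max_batched_tokens : Int) : Int × Int :=
  let total_talker_len := pv_talker_prompt_ids_length prompt_ids
  let im_start_indexes :=
    ((PySem.List.pyRange 0 ((prompt_ids.length : Int)) 1).filter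
      (fun i => PySem.List.pyGetD prompt_ids i 0 == 151644)) ++ [(prompt_ids.length : Int)]
  let system_prefix_len :=
    pv_sysloop prompt_ids im_start_indexes
      (PySem.List.pyRange 0 (((im_start_indexes.length : Int)) - 1) 1) 0
  let total_prompt_len := (prompt_ids.length : Int)
  if thinker_max_batched_tokens ≤ 0 then (max 1 total_talker_len, total_talker_len)
  else
    let first_non_sys_batch_start :=
      (PySem.Int.floordiv system_prefix_len thinker_max_batched_tokens) * thinker_max_batched_tokens
    let first_non_sys_batch_end := min (first_non_sys_batch_start + thinker_max_batched_tokens) total_prompt_len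
    let first_chunk_non_system := max 0 (first_non_sys_batch_end - max system_prefix_len first_non_sys_batch_start)
    let first_chunk_talker_len := min first_chunk_non_system total_talker_len
    (max 1 first_chunk_talker_len, total_talker_len)

-- ===== PORT B =====
-- B's close-segment step: state (sum_user, sys_prefix, counting_sys, bonus, prev)
def pvB_doClose (prompt_ids : List Int) (n : Int)
    (st : Int × Int × Bool × Int × Option Int) (i : Int) : Int × Int × Bool × Int × Option Int :=
  match st with
  | (su, sp, cs, bo, prev) =>
    match prev with
    | none => (su, sp, cs, bo, if i < n then some i else prev)
    | some p =>
      let role := PySem.List.pyGetD prompt_ids (p + 1) 0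
      let su' := if role == 872 then su + (i - p) else su
      let spcs := if cs then (if role == 8948 then (sp + (i - p), cs) else (sp, false)) else (sp, cs)
      let bo' := if i == n && role == 77091 then 9 else bo
      (su', spcs.1, spcs.2, bo', if i < n then some i else prev)

def compute_first_chunk_talker_len_alt (prompt_ids : List Int) (thinker_max_batched_tokens : Int) : Int × Int :=
  let n := (prompt_ids.length : Int)
  let st := (PySem.List.pyRange 0 (n + 1) 1).foldl
    (fun st i => if i == n || PySem.List.pyGetD prompt_ids i 0 == 151644
                 then pvB_doClose prompt_ids n st i else st)
    (0, 0, true, 0, none)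
  let total := st.1 + st.2.2.2.1
  if thinker_max_batched_tokens ≤ 0 then (max 1 total, total)
  else
    let start := (PySem.Int.floordiv st.2.1 thinker_max_batched_tokens) * thinker_max_batched_tokens
    let e := min (start + thinker_max_batched_tokens) n
    let first := max 0 (e - max st.2.1 start)
    (max 1 (min first total), total)

-- ===== PRECONDITION & SPEC =====
-- Pre_ excludes exactly the inputs whose last token is the im_start id 151644: there A (and B too)
-- raises IndexError reading the role token that would follow that im_start.
def Pre_compute_first_chunk_talker_len (prompt_ids : List Int) (thinker_max_batched_tokens : Int) : Prop :=
  prompt_ids.getLast? ≠ some 151644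
instance (prompt_ids : List Int) (thinker_max_batched_tokens : Int) : Decidable (Pre_compute_first_chunk_talker_len prompt_ids thinker_max_batched_tokens) := by unfold Pre_compute_first_chunk_talker_len; infer_instance
def pvWitness_compute_first_chunk_talker_len : List Int × Int :=
  ([151644, 8948, 5, 151644, 872, 6, 7, 151644, 77091, 8], 4)

def Spec_compute_first_chunk_talker_len (prompt_ids : List Int) (thinker_max_batched_tokens : Int) (out : Int × Int) : Prop := out = compute_first_chunk_talker_len_alt prompt_ids thinker_max_batched_tokens
instance (prompt_ids : List Int) (thinker_max_batched_tokens : Int) (out : Int × Int) : Decidable (Spec_compute_first_chunk_talker_len prompt_ids thinker_max_batched_tokens out) := by unfold Spec_compute_first_chunk_talker_len; infer_instance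

-- ===== CLAIM (what is proved, stated in full; the proofs are below) =====
def Claim_equal_compute_first_chunk_talker_len : Prop := ∀ (prompt_ids : List Int) (thinker_max_batched_tokens : Int), Dom_compute_first_chunk_talker_len prompt_ids thinker_max_batched_tokens → Pre_compute_first_chunk_talker_len prompt_ids thinker_max_batched_tokens → Spec_compute_first_chunk_talker_len prompt_ids thinker_max_batched_tokens (compute_first_chunk_talker_len prompt_ids thinker_max_batched_tokens)

-- ===== LEMMAS AND PROOFS =====

def pairFold {σ : Type} (g : σ → Int → Int → Bool → σ) (n : Int) : List Int → σ → σ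
  | [], init => init
  | s :: rest, init => pairFold g n rest (g init s (rest.headD n) rest.isEmpty)

theorem pvBeqShift (a b : Int) : ((a + 1) == (b + 1)) = (a == b) := by
  by_cases h : a = b
  · simp [h]
  · have h2 : ¬(a + 1 = b + 1) := by omega
    simp [h, h2]

theorem idxPairFold {σ : Type} (g : σ → Int → Int → Bool → σ) :
  ∀ (M : List Int) (n : Int) (init : σ),
  (PySem.List.pyRange 0 (((M ++ [n]).length : Int) - 1) 1).foldl
    (fun st i => g st (PySem.List.pyGetD (M ++ [n]) i 0) (PySem.List.pyGetD (M ++ [n]) (i + 1) 0)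
                   (i == ((M ++ [n]).length : Int) - 2)) init
  = pairFold g n M init := by
  intro M
  induction M with
  | nil =>
    intro n init
    have h0 : ((([] : List Int) ++ [n]).length : Int) - 1 = 0 := by simp
    rw [h0, PySem.List.pyRange_one_eq_nil le_rfl]
    rfl
  | cons s rest ih =>
    intro n init
    have hlen : (((s :: rest ++ [n]).length : Int) - 1) = (rest.length : Int) + 1 := by
      simp only [List.length_append, List.length_cons, List.length_nil]; push_cast; ring
    rw [hlen, PySem.List.pyRange_one_cons (by positivity)]
    rw [List.foldl_cons]
    rw [PySem.List.pyRange_one]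
    have hK : (((rest.length : Int) + 1) - (0 + 1)).toNat = rest.length := by omega
    rw [hK]
    -- first application
    have hfirst : (g init (PySem.List.pyGetD ((s :: rest) ++ [n]) 0 0)
        (PySem.List.pyGetD ((s :: rest) ++ [n]) (0 + 1) 0)
        ((0 : Int) == (((s :: rest) ++ [n]).length : Int) - 2))
        = g init s (rest.headD n) rest.isEmpty := by
      rw [List.cons_append]
      cases rest with
      | nil =>
        have h1 : PySem.List.pyGetD (s :: ([] ++ [n])) ((0:Int) + 1) 0 = n := by
          rw [show ((0:Int)+1) = ((1:Nat):Int) from by norm_num, PySem.List.pyGetD_natCast]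
          rfl
        have h0 : PySem.List.pyGetD (s :: (([]:List Int) ++ [n])) (0:Int) 0 = s := by
          rw [show (0:Int) = ((0:Nat):Int) from rfl, PySem.List.pyGetD_natCast]
          rfl
        rw [h1, h0]
        simp
      | cons a t =>
        have h1 : PySem.List.pyGetD (s :: (a :: t ++ [n])) ((0:Int) + 1) 0 = a := by
          rw [show ((0:Int)+1) = ((1:Nat):Int) from by norm_num, PySem.List.pyGetD_natCast]
          rfl
        have h2 : ((0 : Int) == ((s :: (a :: t ++ [n])).length : Int) - 2) = false := by
          simp only [beq_eq_false_iff_ne]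
          simp only [List.length_append, List.length_cons, List.length_nil]
          push_cast; omega
        have h0 : PySem.List.pyGetD (s :: (a :: t ++ [n])) (0:Int) 0 = s := by
          rw [show (0:Int) = ((0:Nat):Int) from rfl, PySem.List.pyGetD_natCast]
          rfl
        rw [h1, h2, h0]
        simp
    rw [hfirst]
    -- shift the tail fold and apply ih
    rw [show pairFold g n (s :: rest) init = pairFold g n rest (g init s (rest.headD n) rest.isEmpty) from rfl]
    rw [← ih n (g init s (rest.headD n) rest.isEmpty)]
    have hlen' : (((rest ++ [n]).length : Int) - 1) = (rest.length : Int) := by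
      simp only [List.length_append, List.length_cons, List.length_nil]; push_cast; ring
    rw [hlen', PySem.List.pyRange_one]
    have hK' : ((rest.length : Int) - 0).toNat = rest.length := by omega
    rw [hK']
    rw [List.foldl_map, List.foldl_map]
    apply PySem.List.foldl_congr_mem
    intro acc k hk
    have hk' : k < rest.length := List.mem_range.mp hk
    have e1 : PySem.List.pyGetD ((s :: rest) ++ [n]) (0 + 1 + (k : Int)) 0
        = PySem.List.pyGetD (rest ++ [n]) (0 + (k : Int)) 0 := by
      rw [List.cons_append]
      rw [show (0 : Int) + 1 + (k : Int) = ((k + 1 : Nat) : Int) from by push_cast; ring]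
      rw [show (0 : Int) + (k : Int) = ((k : Nat) : Int) from by omega]
      rw [PySem.List.pyGetD_natCast, PySem.List.pyGetD_natCast, List.getD_cons_succ]
    have e2 : PySem.List.pyGetD ((s :: rest) ++ [n]) (0 + 1 + (k : Int) + 1) 0
        = PySem.List.pyGetD (rest ++ [n]) (0 + (k : Int) + 1) 0 := by
      rw [List.cons_append]
      rw [show (0 : Int) + 1 + (k : Int) + 1 = ((k + 1 + 1 : Nat) : Int) from by push_cast; ring]
      rw [show (0 : Int) + (k : Int) + 1 = ((k + 1 : Nat) : Int) from by push_cast; ring]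
      rw [PySem.List.pyGetD_natCast, PySem.List.pyGetD_natCast, List.getD_cons_succ]
    have e3 : ((0 + 1 + (k : Int)) == (((s :: rest) ++ [n]).length : Int) - 2)
        = ((0 + (k : Int)) == ((rest ++ [n]).length : Int) - 2) := by
      have hC : ((((s :: rest) ++ [n]).length : Int) - 2) = (((rest ++ [n]).length : Int) - 2) + 1 := by
        simp only [List.cons_append, List.length_cons]
        push_cast; omega
      have hx : (0 : Int) + 1 + (k : Int) = (0 + (k : Int)) + 1 := by ring
      rw [hC, hx, pvBeqShift]
    rw [e1, e2, e3]

def sysPair (prompt_ids : List Int) (n : Int) : List Int → Int → Int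
  | [], acc => acc
  | s :: rest, acc =>
    if ((prompt_ids.length : Int) > s + 1) && (PySem.List.pyGetD prompt_ids (s + 1) 0 == 8948)
    then sysPair prompt_ids n rest (acc + (rest.headD n - s))
    else acc

theorem sysShift (L : List Int) (x : Int) (m' : List Int) :
  ∀ (ks : List Nat) (acc : Int),
  pv_sysloop L (x :: m') (ks.map (fun k : Nat => 0 + 1 + (k : Int))) acc
  = pv_sysloop L m' (ks.map (fun k : Nat => 0 + (k : Int))) acc := by
  intro ks
  induction ks with
  | nil => intro acc; rfl
  | cons k t ih =>
    intro acc
    simp only [List.map_cons, pv_sysloop]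
    have e1 : PySem.List.pyGetD (x :: m') (0 + 1 + (k : Int)) 0
        = PySem.List.pyGetD m' (0 + (k : Int)) 0 := by
      rw [show (0 : Int) + 1 + (k : Int) = ((k + 1 : Nat) : Int) from by push_cast; ring]
      rw [show (0 : Int) + (k : Int) = ((k : Nat) : Int) from by omega]
      rw [PySem.List.pyGetD_natCast, PySem.List.pyGetD_natCast, List.getD_cons_succ]
    have e2 : PySem.List.pyGetD (x :: m') (0 + 1 + (k : Int) + 1) 0
        = PySem.List.pyGetD m' (0 + (k : Int) + 1) 0 := by
      rw [show (0 : Int) + 1 + (k : Int) + 1 = ((k + 1 + 1 : Nat) : Int) from by push_cast; ring]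
      rw [show (0 : Int) + (k : Int) + 1 = ((k + 1 : Nat) : Int) from by push_cast; ring]
      rw [PySem.List.pyGetD_natCast, PySem.List.pyGetD_natCast, List.getD_cons_succ]
    rw [e1, e2]
    split
    · exact ih _
    · rfl

theorem idxSysPair (L : List Int) :
  ∀ (M : List Int) (n : Int) (acc : Int),
  pv_sysloop L (M ++ [n]) (PySem.List.pyRange 0 (((M ++ [n]).length : Int) - 1) 1) acc
  = sysPair L n M acc := by
  intro M
  induction M with
  | nil =>
    intro n acc
    have h0 : ((([] : List Int) ++ [n]).length : Int) - 1 = 0 := by simp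
    rw [h0, PySem.List.pyRange_one_eq_nil le_rfl]
    rfl
  | cons s rest ih =>
    intro n acc
    have hlen : (((s :: rest ++ [n]).length : Int) - 1) = (rest.length : Int) + 1 := by
      simp only [List.length_append, List.length_cons, List.length_nil]; push_cast; ring
    rw [hlen, PySem.List.pyRange_one_cons (by positivity), PySem.List.pyRange_one]
    have hK : (((rest.length : Int) + 1) - (0 + 1)).toNat = rest.length := by omega
    rw [hK]
    simp only [pv_sysloop]
    have h0 : PySem.List.pyGetD ((s :: rest) ++ [n]) (0 : Int) 0 = s := by
      rw [List.cons_append, show (0:Int) = ((0:Nat):Int) from rfl, PySem.List.pyGetD_natCast]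
      rfl
    have h1 : PySem.List.pyGetD ((s :: rest) ++ [n]) ((0:Int) + 1) 0 = rest.headD n := by
      rw [List.cons_append, show ((0:Int)+1) = ((1:Nat):Int) from by norm_num, PySem.List.pyGetD_natCast]
      cases rest <;> rfl
    rw [h0, h1]
    have hshift : ∀ acc' : Int,
        pv_sysloop L ((s :: rest) ++ [n]) (List.map (fun k : Nat => 0 + 1 + (k : Int)) (List.range rest.length)) acc'
        = sysPair L n rest acc' := by
      intro acc'
      rw [List.cons_append, sysShift]
      have := ih n acc'
      have hlen' : (((rest ++ [n]).length : Int) - 1) = (rest.length : Int) := by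
        simp only [List.length_append, List.length_cons, List.length_nil]; push_cast; ring
      rw [hlen', PySem.List.pyRange_one] at this
      have hK' : ((rest.length : Int) - 0).toNat = rest.length := by omega
      rw [hK'] at this
      exact this
    show (if _ then _ else _) = _
    rw [sysPair]
    split
    · exact hshift _
    · rfl


-- the per-segment step of A's user loop
def gA (L : List Int) (st : Int × Int) (s e : Int) (last : Bool) : Int × Int :=
  let role := PySem.List.pyGetD L (s + 1) 0
  if role == 8948 then st
  else if role == 872 then (st.1 + (e - s), st.2)
  else if role == 77091 && last then (st.1, st.2 + 9)
  else st

-- the per-segment step of B's streaming pass (accumulators only)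
def gB (L : List Int) (st : Int × Int × Bool × Int) (s e : Int) (last : Bool) : Int × Int × Bool × Int :=
  let role := PySem.List.pyGetD L (s + 1) 0
  ((if role == 872 then st.1 + (e - s) else st.1),
   (if st.2.2.1 && (role == 8948) then st.2.1 + (e - s) else st.2.1),
   (st.2.2.1 && (role == 8948)),
   (if last && (role == 77091) then 9 else st.2.2.2))

-- B's doClose-fold over the markers followed by the virtual close at n is the structural pairFold
theorem Bstruct (L : List Int) (n : Int) :
  ∀ (M : List Int), (∀ s ∈ M, s < n) → ∀ (p su sp : Int) (cs : Bool) (bo : Int),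
  pvB_doClose L n (M.foldl (pvB_doClose L n) (su, sp, cs, bo, some p)) n
  = ((pairFold (gB L) n (p :: M) (su, sp, cs, bo)).1,
     (pairFold (gB L) n (p :: M) (su, sp, cs, bo)).2.1,
     (pairFold (gB L) n (p :: M) (su, sp, cs, bo)).2.2.1,
     (pairFold (gB L) n (p :: M) (su, sp, cs, bo)).2.2.2,
     some (M.getLastD p)) := by
  intro M
  induction M with
  | nil =>
    intro _ p su sp cs bo
    simp only [List.foldl_nil, pvB_doClose, pairFold, gB, List.headD_nil, List.isEmpty_nil,
      List.getLastD_nil]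
    have h1 : ((n : Int) == n) = true := by simp
    have h2 : ¬(n < n) := lt_irrefl n
    rw [h1]
    simp only [Bool.true_and, if_neg h2]
    cases cs <;> by_cases hr : PySem.List.pyGetD L (p + 1) 0 = 8948 <;> simp [hr]
  | cons m0 rest ih =>
    intro h p su sp cs bo
    have hm0 : m0 < n := h m0 (by simp)
    have hne : (m0 == n) = false := by simp; omega
    rw [List.foldl_cons]
    have hstep : pvB_doClose L n (su, sp, cs, bo, some p) m0
        = ((gB L (su, sp, cs, bo) p m0 false).1,
           (gB L (su, sp, cs, bo) p m0 false).2.1,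
           (gB L (su, sp, cs, bo) p m0 false).2.2.1,
           (gB L (su, sp, cs, bo) p m0 false).2.2.2,
           some m0) := by
      simp only [pvB_doClose, gB, hne, Bool.false_and, if_neg (by simp : ¬(false = true)),
        if_pos hm0]
      cases cs <;> by_cases hr : PySem.List.pyGetD L (p + 1) 0 = 8948 <;> simp [hr]
    rw [hstep]
    have := ih (fun s hs => h s (by simp [hs])) m0
      (gB L (su, sp, cs, bo) p m0 false).1
      (gB L (su, sp, cs, bo) p m0 false).2.1
      (gB L (su, sp, cs, bo) p m0 false).2.2.1
      (gB L (su, sp, cs, bo) p m0 false).2.2.2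
    rw [this]
    have hpf : pairFold (gB L) n (p :: m0 :: rest) (su, sp, cs, bo)
        = pairFold (gB L) n (m0 :: rest) (gB L (su, sp, cs, bo) p m0 false) := rfl
    rw [hpf, List.getLastD_cons]

-- A's user loop and B's accumulators agree
theorem pairAB (L : List Int) (n : Int) :
  ∀ (M : List Int) (su al sp : Int) (cs : Bool),
  ((pairFold (gB L) n M (su, sp, cs, 0)).1 = (pairFold (gA L) n M (su, al)).1)
  ∧ ((pairFold (gB L) n M (su, sp, cs, 0)).2.2.2 + al = (pairFold (gA L) n M (su, al)).2) := by
  intro M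
  induction M with
  | nil => intro su al sp cs; exact ⟨rfl, zero_add al⟩
  | cons s rest ih =>
    intro su al sp cs
    cases rest with
    | nil =>
      simp only [pairFold, gA, gB, List.headD_nil, List.isEmpty_nil, Bool.true_and, Bool.and_true]
      by_cases h1 : PySem.List.pyGetD L (s + 1) 0 = 8948 <;>
        by_cases h2 : PySem.List.pyGetD L (s + 1) 0 = 872 <;>
        by_cases h3 : PySem.List.pyGetD L (s + 1) 0 = 77091 <;>
        simp [h1, h2, h3] <;> omega
    | cons a t =>
      have hpfB : pairFold (gB L) n (s :: a :: t) (su, sp, cs, 0)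
          = pairFold (gB L) n (a :: t) (gB L (su, sp, cs, 0) s a false) := rfl
      have hpfA : pairFold (gA L) n (s :: a :: t) (su, al)
          = pairFold (gA L) n (a :: t) (gA L (su, al) s a false) := rfl
      rw [hpfB, hpfA]
      have hB0 : (gB L (su, sp, cs, 0) s a false)
          = ((gB L (su, sp, cs, 0) s a false).1, (gB L (su, sp, cs, 0) s a false).2.1,
             (gB L (su, sp, cs, 0) s a false).2.2.1, (0 : Int)) := by
        simp [gB]
      have hA0 : (gA L (su, al) s a false) = ((gA L (su, al) s a false).1, al) := by
        by_cases h1 : PySem.List.pyGetD L (s + 1) 0 = 8948 <;>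
          by_cases h2 : PySem.List.pyGetD L (s + 1) 0 = 872 <;>
          simp [gA, h1, h2]
      have hsu : (gB L (su, sp, cs, 0) s a false).1 = (gA L (su, al) s a false).1 := by
        by_cases h1 : PySem.List.pyGetD L (s + 1) 0 = 8948 <;>
          by_cases h2 : PySem.List.pyGetD L (s + 1) 0 = 872 <;>
          simp [gA, gB, h1, h2]
      rw [hB0, hA0, hsu]
      exact ih _ _ _ _

theorem pairSysOff (L : List Int) (n : Int) :
  ∀ (M : List Int) (su sp : Int) (bo : Int),
  (pairFold (gB L) n M (su, sp, false, bo)).2.1 = sp := by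
  intro M
  induction M with
  | nil => intro su sp bo; rfl
  | cons s rest ih =>
    intro su sp bo
    have hpf : pairFold (gB L) n (s :: rest) (su, sp, false, bo)
        = pairFold (gB L) n rest (gB L (su, sp, false, bo) s (rest.headD n) rest.isEmpty) := rfl
    rw [hpf]
    have hB : (gB L (su, sp, false, bo) s (rest.headD n) rest.isEmpty)
        = ((gB L (su, sp, false, bo) s (rest.headD n) rest.isEmpty).1, sp, false,
           (gB L (su, sp, false, bo) s (rest.headD n) rest.isEmpty).2.2.2) := by
      simp [gB]
    rw [hB]
    exact ih _ _ _

-- A's break loop and B's counting_sys flag agree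
theorem pairSys (L : List Int) (n : Int) :
  ∀ (M : List Int), (∀ s ∈ M, s + 1 < (L.length : Int)) → ∀ (su sp bo : Int),
  (pairFold (gB L) n M (su, sp, true, bo)).2.1 = sysPair L n M sp := by
  intro M
  induction M with
  | nil => intro _ su sp bo; rfl
  | cons s rest ih =>
    intro h su sp bo
    have hs : s + 1 < (L.length : Int) := h s (by simp)
    have hguard : (decide ((L.length : Int) > s + 1)) = true := by simp; omega
    have hpf : pairFold (gB L) n (s :: rest) (su, sp, true, bo)
        = pairFold (gB L) n rest (gB L (su, sp, true, bo) s (rest.headD n) rest.isEmpty) := rfl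
    rw [hpf, sysPair]
    by_cases hr : PySem.List.pyGetD L (s + 1) 0 = 8948
    · have hB : (gB L (su, sp, true, bo) s (rest.headD n) rest.isEmpty)
          = ((gB L (su, sp, true, bo) s (rest.headD n) rest.isEmpty).1,
             sp + (rest.headD n - s), true,
             (gB L (su, sp, true, bo) s (rest.headD n) rest.isEmpty).2.2.2) := by
        simp [gB, hr]
      rw [hB, if_pos (by rw [hguard, hr]; simp)]
      exact ih (fun x hx => h x (by simp [hx])) _ _ _
    · have hB : (gB L (su, sp, true, bo) s (rest.headD n) rest.isEmpty)
          = ((gB L (su, sp, true, bo) s (rest.headD n) rest.isEmpty).1, sp, false,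
             (gB L (su, sp, true, bo) s (rest.headD n) rest.isEmpty).2.2.2) := by
        simp [gB, hr]
      rw [hB, if_neg (by simp [hr])]
      exact pairSysOff L n rest _ _ _

-- under Pre_, every im_start marker has its role token inside the list
theorem Mfact (L : List Int) (hpre : L.getLast? ≠ some 151644) :
  ∀ s ∈ (PySem.List.pyRange 0 ((L.length : Int)) 1).filter (fun i => PySem.List.pyGetD L i 0 == 151644),
    0 ≤ s ∧ s + 1 < (L.length : Int) := by
  intro s hs
  rw [List.mem_filter] at hs
  obtain ⟨hmem, hbeq⟩ := hs
  rw [PySem.List.mem_pyRange_one] at hmem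
  refine ⟨hmem.1, ?_⟩
  by_contra hcon
  have hlt : s.toNat < L.length := by omega
  have hval : PySem.List.pyGetD L s 0 = L[s.toNat] := PySem.List.pyGetD_eq_getElem (xs := L) (i := s) (d := 0) hmem.1 hmem.2
  have heq : L[s.toNat] = 151644 := by
    rw [hval] at hbeq; exact of_decide_eq_true hbeq
  have hsnat : s.toNat = L.length - 1 := by omega
  apply hpre
  rw [List.getLast?_eq_getElem?]
  rw [List.getElem?_eq_getElem (by omega : L.length - 1 < L.length)]
  have hidx : L[L.length - 1]'(by omega) = L[s.toNat]'hlt := by congr 1; omega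
  rw [hidx, heq]

-- the filter defining B's close positions is the marker list with the end sentinel
theorem filterB (L : List Int) :
  (PySem.List.pyRange 0 ((L.length : Int) + 1) 1).filter
      (fun i => i == (L.length : Int) || PySem.List.pyGetD L i 0 == 151644)
  = ((PySem.List.pyRange 0 ((L.length : Int)) 1).filter (fun i => PySem.List.pyGetD L i 0 == 151644))
    ++ [(L.length : Int)] := by
  rw [PySem.List.pyRange_one_append 0 ((L.length : Int)) ((L.length : Int) + 1) (by positivity) (by omega)]
  rw [List.filter_append]
  congr 1
  · apply List.filter_congr
    intro i hi
    rw [PySem.List.mem_pyRange_one] at hi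
    have : (i == (L.length : Int)) = false := by simp; omega
    rw [this, Bool.false_or]
  · rw [show PySem.List.pyRange ((L.length : Int)) ((L.length : Int) + 1) 1 = [(L.length : Int)] from PySem.List.pyRange_one_singleton _]
    simp

-- B's whole loop, reduced to the structural pairFold over the marker list
theorem Bcore (L : List Int)
  (h : ∀ s ∈ ((PySem.List.pyRange 0 ((L.length : Int)) 1).filter (fun i => PySem.List.pyGetD L i 0 == 151644)),
      0 ≤ s ∧ s + 1 < (L.length : Int)) :
  ∃ pv : Option Int,
  ((PySem.List.pyRange 0 ((L.length : Int) + 1) 1).foldl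
     (fun st i => if i == (L.length : Int) || PySem.List.pyGetD L i 0 == 151644
                  then pvB_doClose L ((L.length : Int)) st i else st)
     (0, 0, true, 0, none))
  = ((pairFold (gB L) ((L.length : Int)) ((PySem.List.pyRange 0 ((L.length : Int)) 1).filter (fun i => PySem.List.pyGetD L i 0 == 151644)) (0, 0, true, 0)).1,
     (pairFold (gB L) ((L.length : Int)) ((PySem.List.pyRange 0 ((L.length : Int)) 1).filter (fun i => PySem.List.pyGetD L i 0 == 151644)) (0, 0, true, 0)).2.1,
     (pairFold (gB L) ((L.length : Int)) ((PySem.List.pyRange 0 ((L.length : Int)) 1).filter (fun i => PySem.List.pyGetD L i 0 == 151644)) (0, 0, true, 0)).2.2.1,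
     (pairFold (gB L) ((L.length : Int)) ((PySem.List.pyRange 0 ((L.length : Int)) 1).filter (fun i => PySem.List.pyGetD L i 0 == 151644)) (0, 0, true, 0)).2.2.2,
     pv) := by
  rw [PySem.List.foldl_if_eq_foldl_filter]
  rw [filterB L]
  rcases hM : (PySem.List.pyRange 0 ((L.length : Int)) 1).filter (fun i => PySem.List.pyGetD L i 0 == 151644) with _ | ⟨m0, M'⟩
  · refine ⟨none, ?_⟩
    simp only [List.nil_append, List.foldl_cons, List.foldl_nil, pvB_doClose, pairFold]
    rw [if_neg (lt_irrefl ((L.length : Int)))]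
  · rw [hM] at h
    have hm0 : m0 < (L.length : Int) := by
      have := h m0 (by simp)
      omega
    refine ⟨some (M'.getLastD m0), ?_⟩
    rw [List.cons_append, List.foldl_cons]
    have hstep0 : pvB_doClose L ((L.length : Int)) (0, 0, true, 0, none) m0
        = (0, 0, true, 0, some m0) := by
      simp only [pvB_doClose]
      rw [if_pos hm0]
    rw [hstep0, List.foldl_append, List.foldl_cons, List.foldl_nil]
    exact Bstruct L ((L.length : Int)) M'
      (fun s hs => by have := (h s (by simp [hs])).2; omega) m0 0 0 true 0

-- ===== VERDICT (by name: the statement is the Claim_ definition above) =====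
theorem compute_first_chunk_talker_len_spec : Claim_equal_compute_first_chunk_talker_len := by
  unfold Claim_equal_compute_first_chunk_talker_len
  intro L t _hdom hpre
  unfold Pre_compute_first_chunk_talker_len at hpre
  unfold Spec_compute_first_chunk_talker_len
  have hMf := Mfact L hpre
  obtain ⟨pv, hB⟩ := Bcore L hMf
  have hA1 : pv_talker_prompt_ids_length L
      = (pairFold (gA L) ((L.length : Int)) ((PySem.List.pyRange 0 ((L.length : Int)) 1).filter (fun i => PySem.List.pyGetD L i 0 == 151644)) (0, 0)).1
      + (pairFold (gA L) ((L.length : Int)) ((PySem.List.pyRange 0 ((L.length : Int)) 1).filter (fun i => PySem.List.pyGetD L i 0 == 151644)) (0, 0)).2 := by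
    unfold pv_talker_prompt_ids_length
    exact congrArg (fun p : Int × Int => p.1 + p.2)
      (idxPairFold (gA L) ((PySem.List.pyRange 0 ((L.length : Int)) 1).filter (fun i => PySem.List.pyGetD L i 0 == 151644)) ((L.length : Int)) (0, 0))
  have hA2 := idxSysPair L ((PySem.List.pyRange 0 ((L.length : Int)) 1).filter (fun i => PySem.List.pyGetD L i 0 == 151644)) ((L.length : Int)) 0
  have e12 := pairAB L ((L.length : Int)) ((PySem.List.pyRange 0 ((L.length : Int)) 1).filter (fun i => PySem.List.pyGetD L i 0 == 151644)) 0 0 0 true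
  have e1 := e12.1
  have e2 := e12.2
  rw [add_zero] at e2
  have e3 := pairSys L ((L.length : Int)) ((PySem.List.pyRange 0 ((L.length : Int)) 1).filter (fun i => PySem.List.pyGetD L i 0 == 151644)) (fun s hs => (hMf s hs).2) 0 0 0
  simp only [compute_first_chunk_talker_len, compute_first_chunk_talker_len_alt]
  rw [hB, hA1, hA2]
  rw [← e1, ← e2, ← e3]
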